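-- pv_equiv track=rewrite | github.com/frkhhhhh/4_homework | exc_3.py | funksiya
-- ===== SOURCE A (Python) =====
-- def funksiya(lst):
--     natija = []
--     qator = set()
--     for element in lst:
--         if element not in qator:
--             qator.add(element)
--         else:
--             natija.append(element)
--     return natija
-- ===== SOURCE B (Python) =====
-- def funksiya(lst):
--     first = {}
--     for i, x in enumerate(lst):
--         if x not in first:
--             first[x] = i
--     return [x for i, x in enumerate(lst) if first[x] != i]
-- ===== Notes on version B (the rewrite author's own statement) =====
-- stated objective: alternative
-- what changed: Replaces the interleaved seen-set/append loop by two passes: a first pass records each element's first-occurrence index in a dict, a second pass keeps exactly the positions that are not their element's first occurrence.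
import Mathlib
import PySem

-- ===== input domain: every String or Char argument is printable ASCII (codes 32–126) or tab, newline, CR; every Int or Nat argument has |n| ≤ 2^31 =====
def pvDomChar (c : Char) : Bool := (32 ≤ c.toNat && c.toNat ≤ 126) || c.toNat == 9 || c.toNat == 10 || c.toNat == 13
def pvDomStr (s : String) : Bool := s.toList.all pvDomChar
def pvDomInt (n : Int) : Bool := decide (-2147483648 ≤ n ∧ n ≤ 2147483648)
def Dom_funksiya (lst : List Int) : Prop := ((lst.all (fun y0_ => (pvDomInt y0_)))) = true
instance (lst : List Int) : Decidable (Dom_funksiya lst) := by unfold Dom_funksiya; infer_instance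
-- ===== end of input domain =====

-- B replaces A's single interleaved seen-set/append loop by two passes: build a first-occurrence
-- index table, then keep the elements whose position is not their first occurrence (objective: alternative).

-- ===== PORT A =====
def funksiya (lst : List Int) : List Int :=
  (lst.foldl
    (fun (st : List Int × PySem.Set Int) element =>
      if ¬ PySem.Set.contains st.2 element then (st.1, PySem.Set.add st.2 element)
      else (st.1 ++ [element], st.2))
    (([] : List Int), (PySem.Set.empty : PySem.Set Int))).1

-- ===== PORT B =====
-- first pass of Source B: dict mapping each element to the index of its first occurrence
def funksiyaFirst (lst : List Int) : PySem.Dict Int Int :=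
  (PySem.List.enumerate lst 0).foldl
    (fun d p => if ¬ d.contains p.2 then d.insert p.2 p.1 else d)
    PySem.Dict.empty

-- second pass: [x for i, x in enumerate(lst) if first[x] != i]
-- (the key p.2 is always present in the dict, so the default -1 of getD is never used)
def funksiya_alt (lst : List Int) : List Int :=
  ((PySem.List.enumerate lst 0).filter
      (fun p => (funksiyaFirst lst).getD p.2 (-1) != p.1)).map (·.2)

-- ===== PRECONDITION & SPEC =====
def Spec_funksiya (lst : List Int) (out : List Int) : Prop := out = funksiya_alt lst
instance (lst : List Int) (out : List Int) : Decidable (Spec_funksiya lst out) := by unfold Spec_funksiya; infer_instance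

-- ===== CLAIM (what is proved, stated in full; the proofs are below) =====
def Claim_equal_funksiya : Prop := ∀ (lst : List Int), Dom_funksiya lst → Spec_funksiya lst (funksiya lst)

-- ===== LEMMAS AND PROOFS =====

-- common specification: the duplicates (non-first occurrences) of xs, given the elements already seen
def pvDup (seen : List Int) : List Int → List Int
  | [] => []
  | x :: xs => if x ∈ seen then x :: pvDup seen xs else pvDup (seen ++ [x]) xs

theorem pvA_loop (xs : List Int) : ∀ (acc seen : List Int),
    (xs.foldl
      (fun (st : List Int × PySem.Set Int) element =>
        if ¬ PySem.Set.contains st.2 element then (st.1, PySem.Set.add st.2 element)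
        else (st.1 ++ [element], st.2))
      (acc, seen)).1 = acc ++ pvDup seen xs := by
  induction xs with
  | nil => intro acc seen; simp [pvDup]
  | cons x xs ih =>
    intro acc seen
    rw [List.foldl_cons]
    by_cases h : x ∈ seen
    · have hstep : (if ¬ PySem.Set.contains seen x then (acc, PySem.Set.add seen x)
          else (acc ++ [x], seen)) = (acc ++ [x], seen) := by
        simp [PySem.Set.contains, h]
      rw [hstep, ih]
      simp [pvDup, h]
    · have hstep : (if ¬ PySem.Set.contains seen x then (acc, PySem.Set.add seen x)
          else (acc ++ [x], seen)) = (acc, seen ++ [x]) := by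
        simp [PySem.Set.contains, PySem.Set.add, h]
      rw [hstep, ih]
      simp [pvDup, h]

-- the first-pass loop of B, in structural form
def pvBuild : List Int → Int → PySem.Dict Int Int → PySem.Dict Int Int
  | [], _, d => d
  | x :: xs, s, d => pvBuild xs (s + 1) (if ¬ d.contains x then d.insert x s else d)

theorem pvBuild_eq (xs : List Int) : ∀ (s : Int) (d : PySem.Dict Int Int),
    (PySem.List.enumerate xs s).foldl
      (fun d p => if ¬ d.contains p.2 then d.insert p.2 p.1 else d) d = pvBuild xs s d := by
  induction xs with
  | nil => intro s d; simp [PySem.List.enumerate_nil, pvBuild]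
  | cons x xs ih =>
    intro s d
    rw [PySem.List.enumerate_cons, List.foldl_cons, pvBuild]
    exact ih _ _

theorem pvBuild_pres (xs : List Int) : ∀ (s : Int) (d : PySem.Dict Int Int) (k : Int),
    d.contains k = true → (pvBuild xs s d).get? k = d.get? k := by
  induction xs with
  | nil => intro s d k _; simp [pvBuild]
  | cons x xs ih =>
    intro s d k hk
    by_cases hc : d.contains x = true
    · simp [pvBuild, hc, ih _ _ _ hk]
    · have hxk : x ≠ k := fun h => hc (h ▸ hk)
      rw [pvBuild]
      simp only [hc, Bool.false_eq_true, not_false_eq_true, if_pos]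
      rw [ih _ _ _ (by simp [PySem.Dict.contains_insert, hk]),
        PySem.Dict.get?_insert_of_ne _ _ (Ne.symm hxk)]

theorem pvB_loop (xs : List Int) : ∀ (s : Int) (d : PySem.Dict Int Int),
    (∀ k v, d.get? k = some v → v < s) →
    ((PySem.List.enumerate xs s).filter
        (fun p => (pvBuild xs s d).getD p.2 (-1) != p.1)).map (·.2) = pvDup d.keys xs := by
  induction xs with
  | nil => intro s d _; simp [PySem.List.enumerate_nil, pvDup]
  | cons x xs ih =>
    intro s d hd
    rw [PySem.List.enumerate_cons, pvBuild]
    by_cases hc : d.contains x = true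
    · -- x already seen: its first index is < s, so position s is kept
      obtain ⟨v, hv⟩ : ∃ v, d.get? x = some v := by
        have := PySem.Dict.contains_eq_isSome_get? (d := d) (k := x)
        rw [hc] at this; exact Option.isSome_iff_exists.mp this.symm
      have hvs : v < s := hd _ _ hv
      have hget : (pvBuild xs (s + 1) d).getD x (-1) = v := by
        rw [PySem.Dict.getD_eq_get?_getD, pvBuild_pres xs (s + 1) d x hc, hv]; rfl
      have hmem : x ∈ d.keys := (PySem.Dict.contains_iff_mem_keys d x).mp hc
      simp only [hc, not_true_eq_false, if_false, List.filter_cons]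
      rw [hget]
      have : (v != s) = true := by simp; omega
      simp only [this, if_pos, List.map_cons, pvDup, hmem, if_pos]
      rw [ih (s + 1) d (fun k v hkv => by have := hd _ _ hkv; omega)]
    · -- first occurrence of x: its recorded index is s itself, so position s is dropped
      have hget : (pvBuild xs (s + 1) (d.insert x s)).getD x (-1) = s := by
        rw [PySem.Dict.getD_eq_get?_getD,
          pvBuild_pres xs (s + 1) (d.insert x s) x (PySem.Dict.contains_insert_self d x s),
          PySem.Dict.get?_insert_self]; rfl
      have hmem : x ∉ d.keys := fun h => hc ((PySem.Dict.contains_iff_mem_keys d x).mpr h)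
      simp only [hc, Bool.false_eq_true, not_false_eq_true, if_pos, List.filter_cons]
      rw [hget]
      simp only [bne_self_eq_false, Bool.false_eq_true, if_false, pvDup, hmem]
      rw [ih (s + 1) (d.insert x s)
        (fun k v hkv => by
          by_cases hkx : k = x
          · subst hkx; rw [PySem.Dict.get?_insert_self] at hkv
            injection hkv with h; omega
          · rw [PySem.Dict.get?_insert_of_ne _ _ hkx] at hkv
            have := hd _ _ hkv; omega)]
      rw [PySem.Dict.keys_insert_of_not_contains _ _ (by simpa using hc)]

-- ===== VERDICT (by name: the statement is the Claim_ definition above) =====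
theorem funksiya_spec : Claim_equal_funksiya := by
  intro lst _
  unfold Spec_funksiya funksiya funksiya_alt funksiyaFirst
  rw [pvA_loop, pvBuild_eq,
    pvB_loop lst 0 PySem.Dict.empty (fun k v hv => by simp [PySem.Dict.get?_empty] at hv)]
  simp [PySem.Set.empty, PySem.Dict.keys, PySem.Dict.empty]
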